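-- pv_equiv track=rewrite | github.com/ronsse/experience-graph | src/xpgraph/retrieve/formatters.py | format_traces_as_markdown
-- ===== SOURCE A (Python) =====
-- from typing import Any
--
-- def _estimate_tokens(text: str) -> int:
--     """Estimate token count (~4 chars per token)."""
--     return len(text) // 4 + 1
--
-- def format_traces_as_markdown(
--     traces: list[dict[str, Any]],
--     max_tokens: int = 2000,
-- ) -> str:
--     """Format trace summaries as markdown.
--
--     Args:
--         traces: List of trace summary dicts.
--         max_tokens: Maximum token budget.
--
--     Returns:
--         Markdown-formatted string.
--     """
--     if not traces:
--         return "No traces found."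
--
--     lines = [f"# Recent Traces ({len(traces)})", ""]
--     used = _estimate_tokens(lines[0])
--     included = 0
--
--     for t in traces:
--         outcome = t.get("outcome", "unknown")
--         domain = t.get("domain", "")
--         intent = t.get("intent", "")[:120]
--         created = t.get("created_at", "")[:10]
--
--         line = f"- **{outcome}** | {domain or 'general'} | {intent} ({created})"
--         line_tokens = _estimate_tokens(line)
--
--         if used + line_tokens > max_tokens:
--             remaining = len(traces) - included
--             lines.append(f"\n*[{remaining} more traces omitted]*")
--             break
--
--         lines.append(line)
--         used += line_tokens
--         included += 1
--
--     return "\n".join(lines)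
-- ===== SOURCE B (Python) =====
-- def format_traces_as_markdown(traces, max_tokens=2000):
--     if not traces:
--         return "No traces found."
--
--     def fmt(t):
--         outcome = t.get("outcome", "unknown")
--         domain = t.get("domain", "")
--         intent = t.get("intent", "")[:120]
--         created = t.get("created_at", "")[:10]
--         return f"- **{outcome}** | {domain or 'general'} | {intent} ({created})"
--
--     def est(text):
--         return len(text) // 4 + 1
--
--     header = f"# Recent Traces ({len(traces)})"
--     lines = [fmt(t) for t in traces]
--     toks = [est(s) for s in lines]
--
--     budget = max_tokens - est(header)
--     i = 0
--     for k in toks: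
--         if k > budget:
--             break
--         budget -= k
--         i += 1
--
--     body = lines[:i]
--     if i < len(traces):
--         body.append(f"\n*[{len(traces) - i} more traces omitted]*")
--     return "\n".join([header, ""] + body)
-- ===== Notes on version B (the rewrite author's own statement) =====
-- stated objective: alternative
-- what changed: B splits the work into phases: format every trace and estimate its tokens up front, then find the cutoff index with a pure budget countdown, then assemble header + kept lines + optional omitted-note, instead of A's single loop that interleaves formatting, budget accounting and output construction with a break.
import Mathlib
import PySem

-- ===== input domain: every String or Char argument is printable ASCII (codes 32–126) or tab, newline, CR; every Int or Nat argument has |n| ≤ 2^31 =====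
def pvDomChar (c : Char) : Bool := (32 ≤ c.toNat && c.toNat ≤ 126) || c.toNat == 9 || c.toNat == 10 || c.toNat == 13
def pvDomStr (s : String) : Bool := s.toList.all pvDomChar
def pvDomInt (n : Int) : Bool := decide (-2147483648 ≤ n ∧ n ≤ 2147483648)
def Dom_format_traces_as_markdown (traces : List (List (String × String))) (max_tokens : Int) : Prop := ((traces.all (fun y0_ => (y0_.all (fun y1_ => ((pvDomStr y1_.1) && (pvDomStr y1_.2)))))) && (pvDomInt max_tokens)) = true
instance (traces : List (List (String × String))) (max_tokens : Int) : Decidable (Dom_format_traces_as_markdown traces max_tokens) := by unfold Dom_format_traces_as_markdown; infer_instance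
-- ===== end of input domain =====

-- B changes the decomposition only: format-and-measure all traces first, then find the cutoff by a pure
-- budget countdown, then assemble the document — same output, same O(n) cost (objective: alternative).


-- ===== PORT A =====
-- _estimate_tokens(text) = len(text) // 4 + 1
def pvEstA (text : String) : Int := PySem.Int.floordiv (PySem.Str.len text) 4 + 1

-- A's for-loop over traces carrying (lines, used, included); n = len(traces)
def pvLoopA (n max_tokens : Int) : List (List (String × String)) → List String → Int → Int → List String
  | [], lines, _, _ => lines
  | t :: rest, lines, used, included =>
    let d := PySem.Dict.mk t
    let outcome := d.getD "outcome" "unknown"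
    let domain := d.getD "domain" ""
    let intent := PySem.Str.slice (d.getD "intent" "") none (some 120)
    let created := PySem.Str.slice (d.getD "created_at" "") none (some 10)
    let line := "- **" ++ outcome ++ "** | " ++ (if domain = "" then "general" else domain) ++ " | " ++ intent ++ " (" ++ created ++ ")"
    let line_tokens := pvEstA line
    if used + line_tokens > max_tokens then
      lines ++ ["\n*[" ++ PySem.Int.toStr (n - included) ++ " more traces omitted]*"]
    else
      pvLoopA n max_tokens rest (lines ++ [line]) (used + line_tokens) (included + 1)

def format_traces_as_markdown (traces : List (List (String × String))) (max_tokens : Int) : String :=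
  if traces = [] then "No traces found."
  else
    let header := "# Recent Traces (" ++ PySem.Int.toStr traces.length ++ ")"
    PySem.Str.join "\n" (pvLoopA traces.length max_tokens traces [header, ""] (pvEstA header) 0)

-- ===== PORT B =====
def pvEstB (text : String) : Int := PySem.Int.floordiv (PySem.Str.len text) 4 + 1

-- fmt(t): format one trace dict as a markdown bullet line
def pvFmtB (t : List (String × String)) : String :=
  let d := PySem.Dict.mk t
  let outcome := d.getD "outcome" "unknown"
  let domain := d.getD "domain" ""
  let intent := PySem.Str.slice (d.getD "intent" "") none (some 120)
  let created := PySem.Str.slice (d.getD "created_at" "") none (some 10)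
  "- **" ++ outcome ++ "** | " ++ (if domain = "" then "general" else domain) ++ " | " ++ intent ++ " (" ++ created ++ ")"

-- the budget-countdown loop: how many leading token counts fit into the budget
def pvCutoffB : List Int → Int → Nat
  | [], _ => 0
  | k :: rest, budget => if k > budget then 0 else pvCutoffB rest (budget - k) + 1

def format_traces_as_markdown_alt (traces : List (List (String × String))) (max_tokens : Int) : String :=
  if traces = [] then "No traces found."
  else
    let header := "# Recent Traces (" ++ PySem.Int.toStr traces.length ++ ")"
    let lines := traces.map pvFmtB
    let toks := lines.map pvEstB
    let i := pvCutoffB toks (max_tokens - pvEstB header)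
    let body := lines.take i ++
      (if i < traces.length then ["\n*[" ++ PySem.Int.toStr ((traces.length : Int) - (i : Int)) ++ " more traces omitted]*"] else [])
    PySem.Str.join "\n" ([header, ""] ++ body)

-- ===== PRECONDITION & SPEC =====
def Spec_format_traces_as_markdown (traces : List (List (String × String))) (max_tokens : Int) (out : String) : Prop := out = format_traces_as_markdown_alt traces max_tokens
instance (traces : List (List (String × String))) (max_tokens : Int) (out : String) : Decidable (Spec_format_traces_as_markdown traces max_tokens out) := by unfold Spec_format_traces_as_markdown; infer_instance

-- ===== CLAIM (what is proved, stated in full; the proofs are below) =====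
def Claim_equal_format_traces_as_markdown : Prop := ∀ (traces : List (List (String × String))) (max_tokens : Int), Dom_format_traces_as_markdown traces max_tokens → Spec_format_traces_as_markdown traces max_tokens (format_traces_as_markdown traces max_tokens)

-- ===== LEMMAS AND PROOFS =====

-- A's loop unrolled against B's phases: starting from accumulator `acc`, budget `max - used`, count `included`
theorem pvLoopA_eq (max_tokens n : Int) (ts : List (List (String × String)))
    (acc : List String) (used included : Int) :
    pvLoopA n max_tokens ts acc used included =
      acc ++ (ts.map pvFmtB).take (pvCutoffB ((ts.map pvFmtB).map pvEstB) (max_tokens - used)) ++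
        (if pvCutoffB ((ts.map pvFmtB).map pvEstB) (max_tokens - used) < ts.length then
          ["\n*[" ++ PySem.Int.toStr (n - included - (pvCutoffB ((ts.map pvFmtB).map pvEstB) (max_tokens - used) : Int)) ++ " more traces omitted]*"]
        else []) := by
  induction ts generalizing acc used included with
  | nil => simp [pvLoopA, pvCutoffB]
  | cons t rest ih =>
    change (if used + pvEstA (pvFmtB t) > max_tokens then
        acc ++ ["\n*[" ++ PySem.Int.toStr (n - included) ++ " more traces omitted]*"]
      else pvLoopA n max_tokens rest (acc ++ [pvFmtB t]) (used + pvEstA (pvFmtB t)) (included + 1)) = _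
    by_cases h : used + pvEstA (pvFmtB t) > max_tokens
    · have hc : pvCutoffB ((( t :: rest).map pvFmtB).map pvEstB) (max_tokens - used) = 0 := by
        simp only [List.map_cons, pvCutoffB, pvEstA, pvEstB] at *
        rw [if_pos (by omega)]
      simp only [if_pos h, hc, List.take_zero, List.append_nil]
      simp
    · have hc : pvCutoffB (((t :: rest).map pvFmtB).map pvEstB) (max_tokens - used) =
          pvCutoffB ((rest.map pvFmtB).map pvEstB) (max_tokens - (used + pvEstA (pvFmtB t))) + 1 := by
        simp only [List.map_cons, pvCutoffB, pvEstA, pvEstB] at *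
        rw [if_neg (by omega)]
        congr 1
        ring_nf
      rw [if_neg h, ih, hc]
      generalize pvCutoffB ((rest.map pvFmtB).map pvEstB) (max_tokens - (used + pvEstA (pvFmtB t))) = i
      simp only [List.map_cons, List.take_succ_cons, List.length_cons, List.append_assoc,
        List.singleton_append, Nat.add_lt_add_iff_right]
      have harith : n - included - ((i : Int) + 1) = n - (included + 1) - (i : Int) := by ring
      push_cast
      rw [harith]

-- ===== VERDICT (by name: the statement is the Claim_ definition above) =====
theorem format_traces_as_markdown_spec : Claim_equal_format_traces_as_markdown := by
  intro traces max_tokens _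
  unfold Spec_format_traces_as_markdown format_traces_as_markdown format_traces_as_markdown_alt
  by_cases h : traces = []
  · simp [h]
  · simp only [if_neg h]
    rw [pvLoopA_eq]
    simp only [Int.sub_zero]
    rfl
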